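-- pv_equiv track=rewrite | github.com/paularpitageo191-ops/TESTING | quality_alignment_v1.py | _filter_page_incoherent_scenarios
-- ===== SOURCE A (Python) =====
-- from typing import Any, Dict, List, Optional, Tuple
--
-- def _scenario_mentions_other_page(scenario_lines: List[str], feature_name: str) -> bool:
--     feature_lower = feature_name.lower()
--     scenario_text = " ".join(line.strip().lower() for line in scenario_lines)
--
--     page_markers = {
--         "text box": ["web tables", "radio button", "buttons", "upload and download"],
--         "web tables": ["text box", "radio button", "buttons", "upload and download"],
--         "radio button": ["text box", "web tables", "buttons", "upload and download"],
--     }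
--     for page_name, forbidden in page_markers.items():
--         if page_name in feature_lower:
--             return any(marker in scenario_text for marker in forbidden)
--     return False
--
-- def _filter_page_incoherent_scenarios(lines: List[str]) -> List[str]:
--     feature_name = ""
--     filtered: List[str] = []
--     i = 0
--     while i < len(lines):
--         line = lines[i]
--         stripped = line.strip()
--
--         if stripped.startswith("Feature:"):
--             feature_name = stripped.split(":", 1)[1].strip()
--             filtered.append(line)
--             i += 1
--             continue
--
--         if stripped.startswith("Scenario:") or stripped.startswith("Scenario Outline:"):
--             block = [line]
--             i += 1
--             while i < len(lines) and not lines[i].strip().startswith(("Scenario:", "Scenario Outline:", "Feature:")):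
--                 block.append(lines[i])
--                 i += 1
--             if not _scenario_mentions_other_page(block, feature_name):
--                 filtered.extend(block)
--             continue
--
--         filtered.append(line)
--         i += 1
--
--     return filtered
-- ===== SOURCE B (Python) =====
-- from typing import List
--
-- def _scenario_mentions_other_page(scenario_lines: List[str], feature_name: str) -> bool:
--     feature_lower = feature_name.lower()
--     scenario_text = " ".join(line.strip().lower() for line in scenario_lines)
--
--     page_markers = {
--         "text box": ["web tables", "radio button", "buttons", "upload and download"],
--         "web tables": ["text box", "radio button", "buttons", "upload and download"],
--         "radio button": ["text box", "web tables", "buttons", "upload and download"],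
--     }
--     for page_name, forbidden in page_markers.items():
--         if page_name in feature_lower:
--             return any(marker in scenario_text for marker in forbidden)
--     return False
--
-- def _filter_page_incoherent_scenarios(lines: List[str]) -> List[str]:
--     # Phase 1: segment the file.  A segment is either a passthrough line
--     # ("pass", [line]) or a scenario block ("block", feature_name, block_lines).
--     segments = []
--     feature_name = ""
--     current = None  # pending ("block", feature_name, block_lines)
--     for line in lines:
--         stripped = line.strip()
--         if stripped.startswith("Feature:"):
--             if current is not None:
--                 segments.append(current)
--                 current = None
--             feature_name = stripped.split(":", 1)[1].strip()
--             segments.append(("pass", [line]))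
--         elif stripped.startswith("Scenario:") or stripped.startswith("Scenario Outline:"):
--             if current is not None:
--                 segments.append(current)
--             current = ("block", feature_name, [line])
--         elif current is not None:
--             current[2].append(line)
--         else:
--             segments.append(("pass", [line]))
--     if current is not None:
--         segments.append(current)
--
--     # Phase 2: keep passthrough segments; keep a block only if it is coherent
--     # with the feature it belongs to.
--     out: List[str] = []
--     for seg in segments:
--         if seg[0] == "pass":
--             out.extend(seg[1])
--         elif not _scenario_mentions_other_page(seg[2], seg[1]):
--             out.extend(seg[2])
--     return out
-- ===== Notes on version B (the rewrite author's own statement) =====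
-- stated objective: alternative
-- what changed: Replaces A's single index-driven while-loop with a nested block-collecting loop by a two-phase pipeline: phase 1 folds over the lines once to build a segment list (passthrough lines and feature-tagged scenario blocks, with the trailing block flushed), phase 2 concatenates the segments, filtering out blocks that mention another page's markers.
import Mathlib
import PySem

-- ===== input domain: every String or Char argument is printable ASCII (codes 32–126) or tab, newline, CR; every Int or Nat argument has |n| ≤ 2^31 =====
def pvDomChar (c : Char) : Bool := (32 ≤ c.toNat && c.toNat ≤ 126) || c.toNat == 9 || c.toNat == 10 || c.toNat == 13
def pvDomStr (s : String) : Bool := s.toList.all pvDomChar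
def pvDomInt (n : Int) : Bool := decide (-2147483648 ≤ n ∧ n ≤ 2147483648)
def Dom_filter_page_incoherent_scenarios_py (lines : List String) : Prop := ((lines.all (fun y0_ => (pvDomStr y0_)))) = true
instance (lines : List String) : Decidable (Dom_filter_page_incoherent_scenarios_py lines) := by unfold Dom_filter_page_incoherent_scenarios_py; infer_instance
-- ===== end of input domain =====

-- B rewrites the single interleaved while-loop as two phases (segment the lines
-- into passthrough lines and tagged scenario blocks, then filter the blocks);
-- objective: alternative decomposition, same cost.

-- ===== PORT A =====
-- shared helper _scenario_mentions_other_page (identical source in Source A and Source B)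
def pvPageMarkers : List (String × List String) :=
  [("text box", ["web tables", "radio button", "buttons", "upload and download"]),
   ("web tables", ["text box", "radio button", "buttons", "upload and download"]),
   ("radio button", ["text box", "web tables", "buttons", "upload and download"])]

def pvMarkersLoop (feature_lower scenario_text : String) : List (String × List String) → Bool
  | [] => false
  | (page_name, forbidden) :: rest =>
    if PySem.Str.isIn page_name feature_lower then
      forbidden.any (fun marker => PySem.Str.isIn marker scenario_text)
    else pvMarkersLoop feature_lower scenario_text rest

def scenario_mentions_other_page_py (scenario_lines : List String) (feature_name : String) : Bool :=
  let feature_lower := PySem.Str.lower feature_name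
  let scenario_text :=
    PySem.Str.join " " (scenario_lines.map (fun line => PySem.Str.lower (PySem.Str.strip line)))
  pvMarkersLoop feature_lower scenario_text pvPageMarkers

-- stripped.split(":", 1)[1].strip(); index 1 always exists since stripped starts with "Feature:"
def pvFeatName (stripped : String) : String :=
  PySem.Str.strip ((PySem.List.pyGet? ((PySem.Str.splitMax? stripped ":" 1).getD []) 1).getD "")

-- the inner while-loop boundary test: lines[i].strip().startswith(("Scenario:", "Scenario Outline:", "Feature:"))
def pvIsBlockBoundary (l : String) : Bool :=
  PySem.Str.startswith (PySem.Str.strip l) "Scenario:" ||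
  PySem.Str.startswith (PySem.Str.strip l) "Scenario Outline:" ||
  PySem.Str.startswith (PySem.Str.strip l) "Feature:"

def pvALoop (feature_name : String) (filtered : List String) : List String → List String
  | [] => filtered
  | line :: rest =>
    let stripped := PySem.Str.strip line
    if PySem.Str.startswith stripped "Feature:" then
      pvALoop (pvFeatName stripped) (filtered ++ [line]) rest
    else if PySem.Str.startswith stripped "Scenario:" ||
            PySem.Str.startswith stripped "Scenario Outline:" then
      let block := line :: rest.takeWhile (fun l => !pvIsBlockBoundary l)
      let rest' := rest.dropWhile (fun l => !pvIsBlockBoundary l)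
      pvALoop feature_name
        (if scenario_mentions_other_page_py block feature_name then filtered else filtered ++ block)
        rest'
    else pvALoop feature_name (filtered ++ [line]) rest
termination_by rest => rest.length
decreasing_by
  · simp
  · simpa using Nat.lt_succ_of_le (List.length_dropWhile_le _ _)
  · simp

def filter_page_incoherent_scenarios_py (lines : List String) : List String :=
  pvALoop "" [] lines

-- ===== PORT B =====
inductive PvSeg where
  | pass : String → PvSeg
  | block : String → List String → PvSeg
deriving DecidableEq, Repr

-- phase-1 step: one line updates (feature_name, pending block, emitted segments)
def pvBStep (st : String × Option (String × List String) × List PvSeg) (line : String) :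
    String × Option (String × List String) × List PvSeg :=
  let feature := st.1
  let cur := st.2.1
  let segs := st.2.2
  let stripped := PySem.Str.strip line
  if PySem.Str.startswith stripped "Feature:" then
    let segs := match cur with
      | some (f, b) => segs ++ [PvSeg.block f b]
      | none => segs
    (pvFeatName stripped, none, segs ++ [PvSeg.pass line])
  else if PySem.Str.startswith stripped "Scenario:" ||
          PySem.Str.startswith stripped "Scenario Outline:" then
    let segs := match cur with
      | some (f, b) => segs ++ [PvSeg.block f b]
      | none => segs
    (feature, some (feature, [line]), segs)
  else match cur with
    | some (f, b) => (feature, some (f, b ++ [line]), segs)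
    | none => (feature, none, segs ++ [PvSeg.pass line])

-- flush the trailing pending block
def pvFinish (st : String × Option (String × List String) × List PvSeg) : List PvSeg :=
  match st.2.1 with
  | some (f, b) => st.2.2 ++ [PvSeg.block f b]
  | none => st.2.2

-- phase 2: keep passthrough lines, filter blocks
def pvRender (segs : List PvSeg) : List String :=
  segs.foldl
    (fun out seg =>
      match seg with
      | PvSeg.pass l => out ++ [l]
      | PvSeg.block f b => if scenario_mentions_other_page_py b f then out else out ++ b)
    []

def filter_page_incoherent_scenarios_py_alt (lines : List String) : List String :=
  pvRender (pvFinish (lines.foldl pvBStep ("", none, [])))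

-- ===== PRECONDITION & SPEC =====
def Spec_filter_page_incoherent_scenarios_py (lines : List String) (out : List String) : Prop := out = filter_page_incoherent_scenarios_py_alt lines
instance (lines : List String) (out : List String) : Decidable (Spec_filter_page_incoherent_scenarios_py lines out) := by unfold Spec_filter_page_incoherent_scenarios_py; infer_instance

-- ===== CLAIM (what is proved, stated in full; the proofs are below) =====
def Claim_equal_filter_page_incoherent_scenarios_py : Prop := ∀ (lines : List String), Dom_filter_page_incoherent_scenarios_py lines → Spec_filter_page_incoherent_scenarios_py lines (filter_page_incoherent_scenarios_py lines)

-- ===== LEMMAS AND PROOFS =====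

def pvEmit : Option (String × List String) → List PvSeg
  | some (f, b) => [PvSeg.block f b]
  | none => []

-- phase 1 unrolled as a structural recursion
def pvGo (feature : String) (cur : Option (String × List String)) : List String → List PvSeg
  | [] => pvEmit cur
  | line :: rest =>
    let stripped := PySem.Str.strip line
    if PySem.Str.startswith stripped "Feature:" then
      pvEmit cur ++ (PvSeg.pass line :: pvGo (pvFeatName stripped) none rest)
    else if PySem.Str.startswith stripped "Scenario:" ||
            PySem.Str.startswith stripped "Scenario Outline:" then
      pvEmit cur ++ pvGo feature (some (feature, [line])) rest
    else match cur with
      | some (f, b) => pvGo feature (some (f, b ++ [line])) rest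
      | none => PvSeg.pass line :: pvGo feature none rest

def pvRenderSeg : PvSeg → List String
  | PvSeg.pass l => [l]
  | PvSeg.block f b => if scenario_mentions_other_page_py b f then [] else b

theorem pvRender_eq_flatMap (segs : List PvSeg) (out : List String) :
    segs.foldl
      (fun out seg =>
        match seg with
        | PvSeg.pass l => out ++ [l]
        | PvSeg.block f b => if scenario_mentions_other_page_py b f then out else out ++ b)
      out = out ++ segs.flatMap pvRenderSeg := by
  induction segs generalizing out with
  | nil => simp
  | cons s rest ih =>
    cases s with
    | pass l => simp [List.foldl, ih, pvRenderSeg]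
    | block f b =>
      by_cases h : scenario_mentions_other_page_py b f = true <;>
        simp [List.foldl, ih, pvRenderSeg, h]

theorem pvBStep_feature (f : String) (cur : Option (String × List String)) (segs : List PvSeg)
    (line : String) (h1 : PySem.Str.startswith (PySem.Str.strip line) "Feature:" = true) :
    pvBStep (f, cur, segs) line
      = (pvFeatName (PySem.Str.strip line), none, (segs ++ pvEmit cur) ++ [PvSeg.pass line]) := by
  cases cur with
  | none => simp only [pvBStep]; rw [if_pos h1]; simp [pvEmit]
  | some c => cases c; simp only [pvBStep]; rw [if_pos h1]; simp [pvEmit]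

theorem pvBStep_scenario (f : String) (cur : Option (String × List String)) (segs : List PvSeg)
    (line : String) (h1 : ¬ PySem.Str.startswith (PySem.Str.strip line) "Feature:" = true)
    (h2 : (PySem.Str.startswith (PySem.Str.strip line) "Scenario:" ||
           PySem.Str.startswith (PySem.Str.strip line) "Scenario Outline:") = true) :
    pvBStep (f, cur, segs) line = (f, some (f, [line]), segs ++ pvEmit cur) := by
  cases cur with
  | none => simp only [pvBStep]; rw [if_neg h1, if_pos h2]; simp [pvEmit]
  | some c => cases c; simp only [pvBStep]; rw [if_neg h1, if_pos h2]; simp [pvEmit]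

theorem pvBStep_plain_none (f : String) (segs : List PvSeg)
    (line : String) (h1 : ¬ PySem.Str.startswith (PySem.Str.strip line) "Feature:" = true)
    (h2 : ¬ (PySem.Str.startswith (PySem.Str.strip line) "Scenario:" ||
             PySem.Str.startswith (PySem.Str.strip line) "Scenario Outline:") = true) :
    pvBStep (f, none, segs) line = (f, none, segs ++ [PvSeg.pass line]) := by
  simp only [pvBStep]; rw [if_neg h1, if_neg h2]

theorem pvBStep_plain_some (f f0 : String) (b : List String) (segs : List PvSeg)
    (line : String) (h1 : ¬ PySem.Str.startswith (PySem.Str.strip line) "Feature:" = true)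
    (h2 : ¬ (PySem.Str.startswith (PySem.Str.strip line) "Scenario:" ||
             PySem.Str.startswith (PySem.Str.strip line) "Scenario Outline:") = true) :
    pvBStep (f, some (f0, b), segs) line = (f, some (f0, b ++ [line]), segs) := by
  simp only [pvBStep]; rw [if_neg h1, if_neg h2]

theorem pvGo_cons (f : String) (cur : Option (String × List String)) (line : String)
    (rest : List String) :
    pvGo f cur (line :: rest)
      = if PySem.Str.startswith (PySem.Str.strip line) "Feature:" = true then
          pvEmit cur ++ (PvSeg.pass line :: pvGo (pvFeatName (PySem.Str.strip line)) none rest)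
        else if (PySem.Str.startswith (PySem.Str.strip line) "Scenario:" ||
                 PySem.Str.startswith (PySem.Str.strip line) "Scenario Outline:") = true then
          pvEmit cur ++ pvGo f (some (f, [line])) rest
        else match cur with
          | some (fb : String × List String) => pvGo f (some (fb.1, fb.2 ++ [line])) rest
          | none => PvSeg.pass line :: pvGo f none rest := by
  cases cur with
  | none => rfl
  | some c => cases c; rfl

theorem pvFoldl_eq_go (rest : List String) (f : String)
    (cur : Option (String × List String)) (segs : List PvSeg) :
    pvFinish (rest.foldl pvBStep (f, cur, segs)) = segs ++ pvGo f cur rest := by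
  induction rest generalizing f cur segs with
  | nil => cases cur with
    | none => simp [pvFinish, pvGo, pvEmit]
    | some c => cases c; simp [pvFinish, pvGo, pvEmit]
  | cons line rest ih =>
    rw [List.foldl_cons, pvGo_cons]
    by_cases h1 : PySem.Str.startswith (PySem.Str.strip line) "Feature:" = true
    · rw [pvBStep_feature f cur segs line h1, ih, if_pos h1]
      simp
    · by_cases h2 : (PySem.Str.startswith (PySem.Str.strip line) "Scenario:" ||
          PySem.Str.startswith (PySem.Str.strip line) "Scenario Outline:") = true
      · rw [pvBStep_scenario f cur segs line h1 h2, ih, if_neg h1, if_pos h2]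
        simp
      · rw [if_neg h1, if_neg h2]
        cases cur with
        | none => rw [pvBStep_plain_none f segs line h1 h2, ih]; simp
        | some c =>
          cases c
          rw [pvBStep_plain_some _ _ _ segs line h1 h2, ih]

theorem pvGo_boundary (f : String) (c : String × List String) (line : String)
    (rest : List String) (h : pvIsBlockBoundary line = true) :
    pvGo f (some c) (line :: rest) = PvSeg.block c.1 c.2 :: pvGo f none (line :: rest) := by
  obtain ⟨f0, b⟩ := c
  rw [pvGo_cons, pvGo_cons]
  by_cases h1 : PySem.Str.startswith (PySem.Str.strip line) "Feature:" = true
  · rw [if_pos h1, if_pos h1]; simp [pvEmit]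
  · by_cases h2 : (PySem.Str.startswith (PySem.Str.strip line) "Scenario:" ||
        PySem.Str.startswith (PySem.Str.strip line) "Scenario Outline:") = true
    · rw [if_neg h1, if_pos h2, if_neg h1, if_pos h2]; simp [pvEmit]
    · exfalso
      unfold pvIsBlockBoundary at h
      simp only [Bool.or_eq_true] at h h2
      rcases h with (h | h) | h
      · exact h2 (Or.inl h)
      · exact h2 (Or.inr h)
      · exact h1 h

theorem pvGo_block (rest : List String) (f f0 : String) (b : List String) :
    pvGo f (some (f0, b)) rest
      = PvSeg.block f0 (b ++ rest.takeWhile (fun l => !pvIsBlockBoundary l))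
        :: pvGo f none (rest.dropWhile (fun l => !pvIsBlockBoundary l)) := by
  induction rest generalizing b with
  | nil => simp [pvGo, pvEmit]
  | cons line rest ih =>
    by_cases hb : pvIsBlockBoundary line = true
    · rw [pvGo_boundary f (f0, b) line rest hb, List.takeWhile_cons, List.dropWhile_cons]
      simp [hb]
    · have horig : pvIsBlockBoundary line = false := by simpa using hb
      have hb' := horig
      unfold pvIsBlockBoundary at hb'
      simp only [Bool.or_eq_false_iff] at hb'
      obtain ⟨⟨hA, hB⟩, hC⟩ := hb'
      have h1 : ¬ PySem.Str.startswith (PySem.Str.strip line) "Feature:" = true :=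
        fun hcon => by rw [hC] at hcon; exact Bool.false_ne_true hcon
      have h2 : ¬ (PySem.Str.startswith (PySem.Str.strip line) "Scenario:" ||
          PySem.Str.startswith (PySem.Str.strip line) "Scenario Outline:") = true :=
        fun hcon => by rw [hA, hB] at hcon; exact Bool.false_ne_true hcon
      rw [pvGo_cons, if_neg h1, if_neg h2]
      show pvGo f (some (f0, b ++ [line])) rest = _
      rw [ih (b ++ [line]), List.takeWhile_cons, List.dropWhile_cons]
      simp [horig]

theorem pvALoop_eq (f : String) (acc : List String) (rest : List String) :
    pvALoop f acc rest = acc ++ (pvGo f none rest).flatMap pvRenderSeg := by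
  induction f, acc, rest using pvALoop.induct with
  | case1 f acc => simp [pvALoop, pvGo, pvEmit]
  | case2 f acc line rest stripped h1 ih =>
    simp only [stripped] at h1 ih
    conv_lhs => simp only [pvALoop]
    rw [if_pos h1, ih, pvGo_cons, if_pos h1]
    simp [pvRenderSeg, pvEmit]
  | case3 f acc line rest stripped h1 h2 block rest' ih =>
    simp only [stripped, block, rest'] at h1 h2 ih
    simp only [dite_eq_ite] at ih
    conv_lhs => simp only [pvALoop]
    rw [if_neg h1, if_pos h2, ih, pvGo_cons, if_neg h1, if_pos h2, pvGo_block]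
    simp only [pvEmit, List.nil_append, List.flatMap_cons, pvRenderSeg]
    by_cases hm : scenario_mentions_other_page_py
        (line :: rest.takeWhile (fun l => !pvIsBlockBoundary l)) f = true
    · simp [hm]
    · simp [hm]
  | case4 f acc line rest stripped h1 h2 ih =>
    simp only [stripped] at h1 h2 ih
    conv_lhs => simp only [pvALoop]
    rw [if_neg h1, if_neg h2, ih, pvGo_cons, if_neg h1, if_neg h2]
    simp [pvRenderSeg]

-- ===== VERDICT (by name: the statement is the Claim_ definition above) =====
theorem filter_page_incoherent_scenarios_py_spec : Claim_equal_filter_page_incoherent_scenarios_py := by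
  intro lines _
  unfold Spec_filter_page_incoherent_scenarios_py
  unfold filter_page_incoherent_scenarios_py filter_page_incoherent_scenarios_py_alt
  rw [pvALoop_eq]
  unfold pvRender
  rw [pvFoldl_eq_go, pvRender_eq_flatMap]
  simp
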